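-- pv_equiv track=rewrite | github.com/se4en/fantasy_helper | fantasy_helper/ui/utils.py | pose_3421
-- ===== SOURCE A (Python) =====
-- from typing import List, Tuple, Optional
--
-- def position_to_id(position: str) -> int:
--     position_mapping = {
--         "GK": 1,
--         "RB": 2,
--         "RCB": 3,
--         "CB": 4,
--         "LCB": 5,
--         "LB": 6,
--         "RWB": 7,
--         "LWB": 8,
--         "RDM": 9,
--         "CDM": 10,
--         "LDM": 11,
--         "RM": 12,
--         "RCM": 13,
--         "CM": 14,
--         "LCM": 15,
--         "LM": 16,
--         "RW": 17,
--         "RAM": 18,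
--         "CAM": 19,
--         "LAM": 20,
--         "LW": 21,
--         "RCF": 22,
--         "ST": 23,
--         "LCF": 24,
--         "SS": 25,
--     }
--     return position_mapping.get(position, 0)
--
-- def prepare_name(name: str) -> str:
--     return name
--
-- def pose_3421(zones_players: List[List[str]]) -> Tuple[List[int], List[str]]:
--     positions, names = [position_to_id("GK")], [prepare_name(zones_players[0][0])]
--
--     # add defenders
--     for position, name in zip(["RCB", "CB", "LCB"], zones_players[1]):
--         positions.append(position_to_id(position))
--         names.append(prepare_name(name))
--
--     # add midfielders
--     for position, name in zip(["RWB", "RDM", "LDM", "LWB"], zones_players[2]):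
--         positions.append(position_to_id(position))
--         names.append(prepare_name(name))
--
--     # add attackers
--     for position, name in zip(["RAM", "LAM"], zones_players[3]):
--         positions.append(position_to_id(position))
--         names.append(prepare_name(name))
--
--     # add attackers
--     for position, name in zip(["ST"], zones_players[4]):
--         positions.append(position_to_id(position))
--         names.append(prepare_name(name))
--
--     return positions, names
-- ===== SOURCE B (Python) =====
-- def pose_3421(zones_players):
--     gk = zones_players[0][0]
--
--     def build(specs):
--         if not specs:
--             return [], []
--         (ids, zone), rest = specs[0], specs[1:]
--         k = min(len(ids), len(zone))
--         ps, ns = build(rest)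
--         return ids[:k] + ps, zone[:k] + ns
--
--     ps, ns = build([([3, 4, 5], zones_players[1]),
--                     ([7, 9, 11, 8], zones_players[2]),
--                     ([18, 20], zones_players[3]),
--                     ([23], zones_players[4])])
--     return [1] + ps, [gk] + ns
-- ===== Notes on version B (the rewrite author's own statement) =====
-- stated objective: alternative
-- what changed: B drops the position_to_id dictionary and per-element append loops entirely: it stores the numeric ids per zone as literal lists, truncates each zone by slicing with k = min(len(ids), len(zone)), and assembles both result lists back-to-front by structural recursion with list concatenation.
import Mathlib
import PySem

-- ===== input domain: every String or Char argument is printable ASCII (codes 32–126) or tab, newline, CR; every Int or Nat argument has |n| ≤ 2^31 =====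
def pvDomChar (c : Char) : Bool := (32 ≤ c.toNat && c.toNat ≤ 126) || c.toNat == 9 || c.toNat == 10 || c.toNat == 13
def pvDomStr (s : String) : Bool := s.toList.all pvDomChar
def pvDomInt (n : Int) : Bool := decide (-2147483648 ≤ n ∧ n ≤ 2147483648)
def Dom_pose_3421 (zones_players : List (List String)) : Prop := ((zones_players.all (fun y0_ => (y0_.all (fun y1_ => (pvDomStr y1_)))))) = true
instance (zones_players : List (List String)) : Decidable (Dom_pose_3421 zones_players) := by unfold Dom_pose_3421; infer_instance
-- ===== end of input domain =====

-- B replaces A's dictionary lookups and four append loops by literal per-zone id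
-- lists, truncating each zone with a slice of length min(len ids, len zone) and
-- assembling both result lists by structural recursion; alternative decomposition.

-- ===== PORT A =====
def positionToId (position : String) : Int :=
  PySem.Dict.getD (PySem.Dict.ofList
    [("GK", (1:Int)), ("RB", 2), ("RCB", 3), ("CB", 4), ("LCB", 5), ("LB", 6),
     ("RWB", 7), ("LWB", 8), ("RDM", 9), ("CDM", 10), ("LDM", 11), ("RM", 12),
     ("RCM", 13), ("CM", 14), ("LCM", 15), ("LM", 16), ("RW", 17), ("RAM", 18),
     ("CAM", 19), ("LAM", 20), ("LW", 21), ("RCF", 22), ("ST", 23), ("LCF", 24),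
     ("SS", 25)]) position 0

def prepareName (name : String) : String := name

-- the body of A's four loops: append one (position id, name) pair
def poseStep (acc : List Int × List String) (pn : String × String) : List Int × List String :=
  (acc.1 ++ [positionToId pn.1], acc.2 ++ [prepareName pn.2])

def pose_3421 (zones_players : List (List String)) : List Int × List String :=
  match PySem.List.pyGet? zones_players 0 with
  | none => ([], [])   -- IndexError, outside Pre_
  | some z0 =>
    match PySem.List.pyGet? z0 0 with
    | none => ([], [])   -- IndexError, outside Pre_
    | some gk =>
      match PySem.List.pyGet? zones_players 1, PySem.List.pyGet? zones_players 2,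
            PySem.List.pyGet? zones_players 3, PySem.List.pyGet? zones_players 4 with
      | some z1, some z2, some z3, some z4 =>
        let s0 := ([positionToId "GK"], [prepareName gk])
        let s1 := (List.zip ["RCB", "CB", "LCB"] z1).foldl poseStep s0
        let s2 := (List.zip ["RWB", "RDM", "LDM", "LWB"] z2).foldl poseStep s1
        let s3 := (List.zip ["RAM", "LAM"] z3).foldl poseStep s2
        (List.zip ["ST"] z4).foldl poseStep s3
      | _, _, _, _ => ([], [])   -- IndexError, outside Pre_

-- ===== PORT B =====
-- Source B's recursive helper 'build': specs[0] destructured, recurse on specs[1:],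
-- ids[:k] / zone[:k] are slices with a nonnegative bound k = min of the lengths
def buildB : List (List Int × List String) → List Int × List String
  | [] => ([], [])
  | (ids, zone) :: rest =>
    let k := min ids.length zone.length
    let r := buildB rest
    (ids.take k ++ r.1, zone.take k ++ r.2)

def pose_3421_alt (zones_players : List (List String)) : List Int × List String :=
  match PySem.List.pyGet? zones_players 0 with
  | none => ([], [])   -- IndexError, outside Pre_
  | some z0 =>
    match PySem.List.pyGet? z0 0 with
    | none => ([], [])   -- IndexError, outside Pre_
    | some gk =>
      -- the literal spec list [(ids, zones_players[i])] built in Source B's call;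
      -- each zones_players[i] may raise IndexError (none), outside Pre_
      match (PySem.List.pyGet? zones_players 1).bind fun z1 =>
            (PySem.List.pyGet? zones_players 2).bind fun z2 =>
            (PySem.List.pyGet? zones_players 3).bind fun z3 =>
            (PySem.List.pyGet? zones_players 4).map fun z4 =>
              [([(3:Int), 4, 5], z1), ([7, 9, 11, 8], z2), ([18, 20], z3), ([23], z4)] with
      | none => ([], [])
      | some specs =>
        let r := buildB specs
        ((1 : Int) :: r.1, gk :: r.2)

-- ===== PRECONDITION & SPEC =====
-- A raises IndexError when fewer than 5 zones are given or the GK zone is empty.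
def Pre_pose_3421 (zones_players : List (List String)) : Prop :=
  5 ≤ zones_players.length ∧ zones_players.getD 0 [] ≠ []
instance (zones_players : List (List String)) : Decidable (Pre_pose_3421 zones_players) := by
  unfold Pre_pose_3421; infer_instance

def pvWitness_pose_3421 : List (List String) :=
  [["Alisson"], ["Walker", "Stones", "Dias"], ["James", "Rice", "Rodri", "Shaw"],
   ["Saka", "Foden"], ["Kane"]]

def Spec_pose_3421 (zones_players : List (List String)) (out : List Int × List String) : Prop := out = pose_3421_alt zones_players
instance (zones_players : List (List String)) (out : List Int × List String) : Decidable (Spec_pose_3421 zones_players out) := by unfold Spec_pose_3421; infer_instance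

-- ===== CLAIM =====
def Claim_equal_pose_3421 : Prop := ∀ (zones_players : List (List String)), Dom_pose_3421 zones_players → Pre_pose_3421 zones_players → Spec_pose_3421 zones_players (pose_3421 zones_players)

-- ===== LEMMAS AND PROOFS =====

-- A's loop over a zipped list appends the mapped ids and the names
theorem foldl_poseStep (ps : List (String × String)) (acc : List Int × List String) :
    ps.foldl poseStep acc
      = (acc.1 ++ ps.map (fun p => positionToId p.1), acc.2 ++ ps.map Prod.snd) := by
  induction ps generalizing acc with
  | nil => simp
  | cons p t ih => simp [poseStep, prepareName, ih]

theorem map_pid_zip (codes : List String) (z : List String) :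
    (List.zip codes z).map (fun p => positionToId p.1)
      = (codes.map positionToId).take (min codes.length z.length) := by
  induction codes generalizing z with
  | nil => simp
  | cons c cs ih =>
    cases z with
    | nil => simp
    | cons a zs => simp [List.zip_cons_cons, ih, Nat.succ_min_succ]

theorem map_snd_zip (codes : List String) (z : List String) :
    (List.zip codes z).map Prod.snd = z.take (min codes.length z.length) := by
  induction codes generalizing z with
  | nil => simp
  | cons c cs ih =>
    cases z with
    | nil => simp
    | cons a zs => simp [List.zip_cons_cons, ih, Nat.succ_min_succ]

-- ===== VERDICT =====
theorem pose_3421_spec : Claim_equal_pose_3421 := by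
  intro zp _ pre
  obtain ⟨hlen, hne⟩ := pre
  match zp, hlen with
  | z0 :: z1 :: z2 :: z3 :: z4 :: rest, _ =>
    match z0, hne with
    | g :: gs, _ =>
      have h0 : (0:Int) ≤ (rest.length:Int) + 1 + 1 + 1 + 1 := by positivity
      have h1 : (0:Int) ≤ (rest.length:Int) + 1 + 1 + 1 := by positivity
      have h2 : (2:Int) ≤ (rest.length:Int) + 1 + 1 + 1 + 1 := by omega
      have h3 : (3:Int) ≤ (rest.length:Int) + 1 + 1 + 1 + 1 := by omega
      have h4 : (4:Int) ≤ (rest.length:Int) + 1 + 1 + 1 + 1 := by omega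
      have e1 : (["RCB", "CB", "LCB"].map positionToId) = [(3:Int), 4, 5] := by decide
      have e2 : (["RWB", "RDM", "LDM", "LWB"].map positionToId) = [(7:Int), 9, 11, 8] := by decide
      have e3 : (["RAM", "LAM"].map positionToId) = [(18:Int), 20] := by decide
      have e4 : (["ST"].map positionToId) = [(23:Int)] := by decide
      have egk : positionToId "GK" = 1 := by decide
      simp [Spec_pose_3421, pose_3421, pose_3421_alt, PySem.List.pyGet?,
            PySem.List.pyIdx?, h0, h1, h2, h3, h4, buildB, foldl_poseStep,
            map_pid_zip, map_snd_zip, e1, e2, e3, e4, egk, prepareName]
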